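-- pv_equiv track=rewrite | github.com/saiganesh-d/Excel-Tracker | smart_diff.py | group_consecutive_changes
-- ===== SOURCE A (Python) =====
-- from typing import List, Tuple
--
-- def group_consecutive_changes(diff_result: List[Tuple[str, str, str]]) -> List[List[Tuple[str, str, str]]]:
--     """Group consecutive changes together"""
--     if not diff_result:
--         return []
--
--     groups = []
--     current_group = []
--
--     for item in diff_result:
--         change_type = item[0]
--
--         if change_type == 'unchanged':
--             if current_group:
--                 groups.append(current_group)
--                 current_group = []
--         else:
--             current_group.append(item)
--
--     if current_group:
--         groups.append(current_group)
--
--     return groups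
-- ===== SOURCE B (Python) =====
-- from typing import List, Tuple
--
-- def group_consecutive_changes(diff_result: List[Tuple[str, str, str]]) -> List[List[Tuple[str, str, str]]]:
--     """Group consecutive changes: find all 'unchanged' marker positions, then
--     slice the list between consecutive boundaries, keeping non-empty slices."""
--     cuts = [i for i, item in enumerate(diff_result) if item[0] == 'unchanged']
--     bounds = [-1] + cuts + [len(diff_result)]
--     return [diff_result[a + 1:b] for a, b in zip(bounds, bounds[1:]) if b - a > 1]
-- ===== Notes on version B (the rewrite author's own statement) =====
-- stated objective: alternative
-- what changed: Replaces A's single-pass accumulator loop (current_group/groups with a trailing flush) by a staged index computation: collect all positions of 'unchanged' markers, pad with -1 and len as sentinels, and slice the list between each pair of consecutive boundaries, keeping the non-empty slices.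
import Mathlib
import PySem

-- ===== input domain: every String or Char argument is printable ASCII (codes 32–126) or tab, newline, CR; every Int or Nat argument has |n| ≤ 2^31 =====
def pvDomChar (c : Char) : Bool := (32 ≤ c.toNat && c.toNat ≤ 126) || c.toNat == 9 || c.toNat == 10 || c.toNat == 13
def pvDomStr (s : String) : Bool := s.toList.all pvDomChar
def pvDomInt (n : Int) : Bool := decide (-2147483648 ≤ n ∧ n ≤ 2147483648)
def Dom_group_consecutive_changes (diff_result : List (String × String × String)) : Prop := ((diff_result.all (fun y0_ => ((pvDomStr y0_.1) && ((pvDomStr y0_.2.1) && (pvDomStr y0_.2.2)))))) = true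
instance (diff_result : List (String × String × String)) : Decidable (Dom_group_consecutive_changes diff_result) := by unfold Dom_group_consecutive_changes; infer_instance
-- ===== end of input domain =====

-- B replaces A's accumulator loop by a staged computation: collect the 'unchanged' marker positions, then slice between consecutive boundaries (alternative decomposition; same O(n) cost).


-- ===== PORT A =====
-- one loop step of A: 'unchanged' flushes the (non-empty) current group, anything else extends it
def pvStepA (st : List (List (String × String × String)) × List (String × String × String))
    (item : String × String × String) :
    List (List (String × String × String)) × List (String × String × String) :=
  if item.1 == "unchanged" then
    (if st.2 = [] then st else (st.1 ++ [st.2], []))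
  else
    (st.1, st.2 ++ [item])

def group_consecutive_changes (diff_result : List (String × String × String)) : List (List (String × String × String)) :=
  if diff_result = [] then []
  else
    let st := diff_result.foldl pvStepA ([], [])
    if st.2 = [] then st.1 else st.1 ++ [st.2]

-- ===== PORT B =====
-- B: cuts = positions of 'unchanged' markers; pad with -1 and len; each slice between
-- consecutive boundaries (exclusive of the markers) that is non-empty is a group.
-- (bounds[1:] is bounds.tail since bounds is non-empty.)
def group_consecutive_changes_alt (diff_result : List (String × String × String)) : List (List (String × String × String)) :=
  let cuts := ((PySem.List.enumerate diff_result 0).filter (fun p => p.2.1 == "unchanged")).map Prod.fst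
  let bounds := (-1 : Int) :: cuts ++ [(diff_result.length : Int)]
  ((bounds.zip bounds.tail).filter (fun p => p.2 - p.1 > 1)).map
    (fun p => PySem.List.slice diff_result (some (p.1 + 1)) (some p.2))

-- ===== PRECONDITION & SPEC =====
def Spec_group_consecutive_changes (diff_result : List (String × String × String)) (out : List (List (String × String × String))) : Prop := out = group_consecutive_changes_alt diff_result
instance (diff_result : List (String × String × String)) (out : List (List (String × String × String))) : Decidable (Spec_group_consecutive_changes diff_result out) := by unfold Spec_group_consecutive_changes; infer_instance

-- ===== CLAIM (what is proved, stated in full; the proofs are below) =====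
def Claim_equal_group_consecutive_changes : Prop := ∀ (diff_result : List (String × String × String)), Dom_group_consecutive_changes diff_result → Spec_group_consecutive_changes diff_result (group_consecutive_changes diff_result)

-- ===== LEMMAS AND PROOFS =====

def pvKey (it : String × String × String) : Bool := it.1 == "unchanged"

-- proof-only reference: recursive run-splitter
def pvR : List (String × String × String) → List (List (String × String × String))
  | [] => []
  | x :: xs =>
    if pvKey x then pvR xs
    else (x :: xs.takeWhile (fun y => !pvKey y)) :: pvR (xs.dropWhile (fun y => !pvKey y))
termination_by xs => xs.length
decreasing_by
  all_goals simp only [List.length_cons]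
  all_goals have h := List.length_dropWhile_le (fun y => !pvKey y) xs
  all_goals omega

-- ---------- A-side: A's fold = pvR ----------

-- proof-only reference function: A's loop with an explicit pending group
def pvAux (cur : List (String × String × String)) :
    List (String × String × String) → List (List (String × String × String))
  | [] => if cur = [] then [] else [cur]
  | x :: xs =>
    if pvKey x then (if cur = [] then pvAux [] xs else cur :: pvAux [] xs)
    else pvAux (cur ++ [x]) xs

theorem pvFoldA_eq_aux (xs : List (String × String × String))
    (gs : List (List (String × String × String))) (cur : List (String × String × String)) :
    (if (xs.foldl pvStepA (gs, cur)).2 = [] then (xs.foldl pvStepA (gs, cur)).1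
     else (xs.foldl pvStepA (gs, cur)).1 ++ [(xs.foldl pvStepA (gs, cur)).2])
    = gs ++ pvAux cur xs := by
  induction xs generalizing gs cur with
  | nil => simp [pvAux]; split_ifs <;> simp
  | cons x xs ih =>
    by_cases hk : (x.1 == "unchanged") = true
    · by_cases hc : cur = []
      · simp only [List.foldl_cons, pvStepA, hk, if_pos, if_pos hc, ih]
        simp [pvAux, pvKey, hk, hc]
      · simp only [List.foldl_cons, pvStepA, hk, if_pos, if_neg hc]
        rw [ih]
        simp [pvAux, pvKey, hk, hc]
    · have hk' : (x.1 == "unchanged") = false := by simpa using hk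
      simp only [List.foldl_cons, pvStepA, hk', Bool.false_eq_true, if_false]
      rw [ih]
      simp [pvAux, pvKey, hk']

-- A with a non-empty pending group: it absorbs the next changed run, then continues
theorem pvAux_ext (xs : List (String × String × String)) (cur : List (String × String × String))
    (h : cur ≠ []) :
    pvAux cur xs = (cur ++ xs.takeWhile (fun y => !pvKey y)) ::
      pvAux [] (xs.dropWhile (fun y => !pvKey y)) := by
  induction xs generalizing cur with
  | nil => simp [pvAux, h]
  | cons x xs ih =>
    by_cases hk : pvKey x = true
    · simp [pvAux, hk, h]
    · have hk' : pvKey x = false := by simpa using hk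
      simp only [pvAux, hk', Bool.false_eq_true, if_false, List.takeWhile_cons, Bool.not_false,
        if_true, List.dropWhile_cons, ih (cur ++ [x]) (by simp)]
      simp

theorem pvAux_eq_R (n : Nat) (xs : List (String × String × String)) (hn : xs.length ≤ n) :
    pvAux [] xs = pvR xs := by
  induction n generalizing xs with
  | zero =>
    have hxs : xs = [] := by
      cases xs with
      | nil => rfl
      | cons a l => simp at hn
    subst hxs; simp [pvAux, pvR]
  | succ n ih =>
    cases xs with
    | nil => simp [pvAux, pvR]
    | cons x xs =>
      by_cases hk : pvKey x = true
      · have h1 : pvAux [] (x :: xs) = pvAux [] xs := by simp [pvAux, hk]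
        rw [h1, ih xs (by simpa using Nat.le_of_succ_le_succ hn)]
        simp [pvR, hk]
      · have hk' : pvKey x = false := by simpa using hk
        have h1 : pvAux [] (x :: xs) = pvAux [x] xs := by simp [pvAux, hk']
        have hdrop : (xs.dropWhile (fun y => !pvKey y)).length ≤ n := by
          have := List.length_dropWhile_le (fun y => !pvKey y) xs
          have hx : xs.length ≤ n := by simpa using Nat.le_of_succ_le_succ hn
          omega
        rw [h1, pvAux_ext xs [x] (by simp), ih _ hdrop]
        simp [pvR, hk']

-- ---------- B-side machinery ----------

def pvCutsFrom (xs : List (String × String × String)) (s : Int) : List Int :=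
  ((PySem.List.enumerate xs s).filter (fun p => pvKey p.2)).map Prod.fst

def pvBounds (xs : List (String × String × String)) : List Int :=
  (-1 : Int) :: pvCutsFrom xs 0 ++ [(xs.length : Int)]

def pvFromBounds (xs : List (String × String × String)) (bs : List Int) :
    List (List (String × String × String)) :=
  ((bs.zip bs.tail).filter (fun p => p.2 - p.1 > 1)).map
    (fun p => PySem.List.slice xs (some (p.1 + 1)) (some p.2))

theorem pvAlt_eq_fromBounds (xs : List (String × String × String)) :
    group_consecutive_changes_alt xs = pvFromBounds xs (pvBounds xs) := by
  simp [group_consecutive_changes_alt, pvFromBounds, pvBounds, pvCutsFrom, pvKey]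

-- enumerate index shift
theorem pvCutsFrom_shift (xs : List (String × String × String)) (s t : Int) :
    pvCutsFrom xs (s + t) = (pvCutsFrom xs t).map (· + s) := by
  induction xs generalizing t with
  | nil => simp [pvCutsFrom, PySem.List.enumerate_nil]
  | cons y ys ih =>
    simp only [pvCutsFrom, PySem.List.enumerate_cons, List.filter_cons]
    by_cases hy : pvKey y = true
    · have h1 : s + t + 1 = s + (t + 1) := by ring
      simp only [hy, if_pos, List.map_cons]
      rw [show (s + t + 1 : Int) = s + (t + 1) by ring]
      have := ih (t + 1)
      simp only [pvCutsFrom] at this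
      simp [this, Int.add_comm]
    · have hy' : pvKey y = false := by simpa using hy
      simp only [hy', Bool.false_eq_true, if_false]
      rw [show (s + t + 1 : Int) = s + (t + 1) by ring]
      have := ih (t + 1)
      simp only [pvCutsFrom] at this
      simp [this]

theorem pvCutsFrom_cons (x : String × String × String) (xs : List (String × String × String)) :
    pvCutsFrom (x :: xs) 0 =
      (if pvKey x then [(0 : Int)] else []) ++ (pvCutsFrom xs 0).map (· + 1) := by
  have h : pvCutsFrom xs 1 = (pvCutsFrom xs 0).map (· + 1) := by
    have := pvCutsFrom_shift xs 1 0
    norm_num at this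
    exact this
  simp only [pvCutsFrom, PySem.List.enumerate_cons, List.filter_cons] at *
  norm_num
  by_cases hx : pvKey x = true
  · simp only [hx, if_pos, List.map_cons]
    simp [h]
  · have hx' : pvKey x = false := by simpa using hx
    simp only [hx', Bool.false_eq_true, if_false]
    simp [h]

theorem pvCutsFrom_append_nokey (p d : List (String × String × String))
    (h : ∀ y ∈ p, pvKey y = false) :
    pvCutsFrom (p ++ d) 0 = (pvCutsFrom d 0).map (· + (p.length : Int)) := by
  induction p with
  | nil => simp
  | cons y ys ih =>
    have hy : pvKey y = false := h y (by simp)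
    rw [List.cons_append, pvCutsFrom_cons]
    rw [show (ys ++ d : List _) = ys ++ d from rfl] at ih
    rw [ih (fun z hz => h z (by simp [hz]))]
    simp only [hy, Bool.false_eq_true, if_false, List.nil_append, List.map_map, List.length_cons]
    apply List.map_congr_left
    intro a _
    simp only [Function.comp]
    push_cast
    ring

theorem pvCutsFrom_nonneg (xs : List (String × String × String)) (b : Int)
    (hb : b ∈ pvCutsFrom xs 0) : 0 ≤ b := by
  simp only [pvCutsFrom, List.mem_map] at hb
  obtain ⟨p, hp, rfl⟩ := hb
  have hp' := List.mem_of_mem_filter hp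
  rw [PySem.List.mem_enumerate_iff] at hp'
  obtain ⟨k, hk, rfl⟩ := hp'
  simp

-- adjacent-pair peel
theorem pvFromBounds_cons (xs : List (String × String × String)) (b0 b1 : Int) (rest : List Int) :
    pvFromBounds xs (b0 :: b1 :: rest) =
      (if b1 - b0 > 1 then [PySem.List.slice xs (some (b0 + 1)) (some b1)] else []) ++
        pvFromBounds xs (b1 :: rest) := by
  simp only [pvFromBounds, List.tail_cons, List.zip_cons_cons, List.filter_cons]
  by_cases h : b1 - b0 > 1
  · simp [h]
  · simp [h]

-- shifting all boundaries by a prefix length drops the prefix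
theorem pvFromBounds_shift (pre d : List (String × String × String)) (bs : List Int)
    (h : ∀ b ∈ bs, -1 ≤ b) :
    pvFromBounds (pre ++ d) (bs.map (· + (pre.length : Int))) = pvFromBounds d bs := by
  simp only [pvFromBounds]
  rw [← List.map_tail, List.zip_map, List.filter_map, List.map_map]
  have hfilter : (List.filter ((fun p => decide (p.2 - p.1 > 1)) ∘
      Prod.map (· + (pre.length : Int)) (· + (pre.length : Int))) (bs.zip bs.tail))
      = List.filter (fun p => decide (p.2 - p.1 > 1)) (bs.zip bs.tail) := by
    apply List.filter_congr
    intro p _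
    simp only [Function.comp, Prod.map]
    rw [decide_eq_decide]
    constructor <;> (intro; omega)
  rw [hfilter]
  apply List.map_congr_left
  intro p hp
  have hgt : p.2 - p.1 > 1 := by
    have := List.of_mem_filter hp
    simpa using this
  have hmem := List.mem_of_mem_filter hp
  have h1 : p.1 ∈ bs := (List.of_mem_zip hmem).1
  have h2 : p.2 ∈ bs := List.mem_of_mem_tail (List.of_mem_zip hmem).2
  have ha : -1 ≤ p.1 := h p.1 h1
  have hb : -1 ≤ p.2 := h p.2 h2
  simp only [Function.comp, Prod.map]
  -- both bounds are (shifted) natural numbers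
  obtain ⟨i, hi⟩ : ∃ i : Nat, p.1 + 1 = (i : Int) := ⟨(p.1 + 1).toNat, by omega⟩
  obtain ⟨j, hj⟩ : ∃ j : Nat, p.2 = (j : Int) := ⟨p.2.toNat, by omega⟩
  have e1 : p.1 + (pre.length : Int) + 1 = ((i + pre.length : Nat) : Int) := by push_cast; omega
  have e2 : p.2 + (pre.length : Int) = ((j + pre.length : Nat) : Int) := by push_cast; omega
  rw [e1, e2, hi, hj, PySem.List.slice_natCast, PySem.List.slice_natCast]
  have hdrop : (pre ++ d).drop (i + pre.length) = d.drop i := by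
    rw [Nat.add_comm, List.drop_append]
    have h0 : List.drop (pre.length + i) pre = [] := List.drop_eq_nil_of_le (by omega)
    rw [h0, List.nil_append]
    congr 1
    omega
  rw [hdrop]
  congr 1
  omega

theorem pvBounds_tail_nonneg (d : List (String × String × String)) (b : Int)
    (hb : b ∈ pvCutsFrom d 0 ++ [(d.length : Int)]) : -1 ≤ b := by
  rcases List.mem_append.1 hb with h | h
  · have := pvCutsFrom_nonneg d b h; omega
  · simp at h; omega

-- the tail of pvBounds d starts with 0 whenever d is empty or starts with a marker
theorem pvBounds_tail_head (d : List (String × String × String))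
    (hd : d = [] ∨ ∃ y ys, d = y :: ys ∧ pvKey y = true) :
    ∃ L', pvCutsFrom d 0 ++ [(d.length : Int)] = 0 :: L' := by
  rcases hd with rfl | ⟨y, ys, rfl, hy⟩
  · exact ⟨[], by simp [pvCutsFrom, PySem.List.enumerate_nil]⟩
  · rw [pvCutsFrom_cons]
    simp [hy]

-- B = pvR
theorem pvFromBounds_eq_R (n : Nat) (xs : List (String × String × String))
    (hn : xs.length ≤ n) :
    pvFromBounds xs (pvBounds xs) = pvR xs := by
  induction n generalizing xs with
  | zero =>
    have hxs : xs = [] := by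
      cases xs with
      | nil => rfl
      | cons a l => simp at hn
    subst hxs
    simp [pvR, pvFromBounds, pvBounds, pvCutsFrom, PySem.List.enumerate_nil]
  | succ n ih =>
    cases xs with
    | nil =>
      simp [pvR, pvFromBounds, pvBounds, pvCutsFrom, PySem.List.enumerate_nil]
    | cons x xs =>
      by_cases hk : pvKey x = true
      · -- marker head: boundaries are those of xs shifted by 1, plus a dropped (-1,0) pair
        have hb : pvBounds (x :: xs) = -1 :: (pvBounds xs).map (· + 1) := by
          simp only [pvBounds, pvCutsFrom_cons, hk, if_pos, List.map_cons, List.map_append]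
          push_cast
          simp
        rw [hb]
        have hmap : (pvBounds xs).map (· + 1) = 0 :: ((pvCutsFrom xs 0 ++ [(xs.length : Int)]).map (· + 1)) := by
          simp [pvBounds]
        rw [hmap, pvFromBounds_cons]
        have h01 : ¬ ((0 : Int) - (-1) > 1) := by omega
        rw [if_neg h01, List.nil_append, ← hmap]
        have hshift := pvFromBounds_shift [x] xs (pvBounds xs) (by
          intro b hb'
          rcases List.mem_cons.1 hb' with rfl | hb''
          · omega
          · exact pvBounds_tail_nonneg xs b hb'')
        simp only [List.length_cons, List.length_nil, Nat.cast_one,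
          zero_add, List.singleton_append] at hshift
        rw [hshift, ih xs (by simpa using Nat.le_of_succ_le_succ hn)]
        simp [pvR, hk]
      · -- changed head: the first run is x :: takeWhile, sliced off as one block
        have hk' : pvKey x = false := by simpa using hk
        set t := xs.takeWhile (fun y => !pvKey y) with ht
        set d := xs.dropWhile (fun y => !pvKey y) with hd
        have hsplit : x :: xs = (x :: t) ++ d := by
          simp [ht, hd, List.takeWhile_append_dropWhile]
        have hnokey : ∀ y ∈ x :: t, pvKey y = false := by
          intro y hy
          rcases List.mem_cons.1 hy with rfl | hy'
          · exact hk'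
          · have := List.mem_takeWhile_imp hy'
            simpa using this
        have hcuts : pvCutsFrom (x :: xs) 0 = (pvCutsFrom d 0).map (· + ((x :: t).length : Int)) := by
          rw [hsplit]
          exact pvCutsFrom_append_nokey (x :: t) d hnokey
        have hdhead : d = [] ∨ ∃ y ys, d = y :: ys ∧ pvKey y = true := by
          cases hdc : d with
          | nil => left; rfl
          | cons y ys =>
            right
            refine ⟨y, ys, rfl, ?_⟩
            have : ¬ (fun y => !pvKey y) y = true := by
              have := List.head?_dropWhile_not (fun y => !pvKey y) xs
              rw [← hd, hdc] at this
              simpa using this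
            simpa using this
        obtain ⟨L', hL⟩ := pvBounds_tail_head d hdhead
        have hlen : ((x :: xs).length : Int) = ((d.length : Int)) + ((x :: t).length : Int) := by
          have htl := congrArg List.length hsplit
          simp only [List.length_cons, List.length_append] at htl
          simp only [List.length_cons]
          push_cast
          omega
        have hb : pvBounds (x :: xs) = -1 :: (0 :: L').map (· + ((x :: t).length : Int)) := by
          have htl := congrArg List.length hsplit
          simp only [List.length_cons, List.length_append] at htl
          simp only [pvBounds, hcuts]
          rw [← hL]
          simp [Int.add_comm]
          all_goals omega
        rw [hb]
        have hm1 : (((x :: t).length : Int)) ≥ 1 := by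
          simp only [List.length_cons]
          push_cast
          omega
        have hmap0 : ((0 : Int) :: L').map (· + ((x :: t).length : Int)) =
            (((x :: t).length : Int)) :: L'.map (· + ((x :: t).length : Int)) := by simp
        rw [hmap0, pvFromBounds_cons, if_pos (by omega), ← hmap0]
        have hshift := pvFromBounds_shift (x :: t) d (0 :: L') (by
          intro b hb'
          rcases List.mem_cons.1 hb' with rfl | hb''
          · omega
          · apply pvBounds_tail_nonneg d
            rw [hL]; exact List.mem_cons_of_mem _ hb'')
        rw [← hsplit] at hshift
        rw [hshift]
        have hBd : pvFromBounds d (0 :: L') = pvFromBounds d (pvBounds d) := by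
          have : pvBounds d = -1 :: 0 :: L' := by simp [pvBounds, hL]
          rw [this, pvFromBounds_cons, if_neg (by omega), List.nil_append]
        have hdlen : d.length ≤ n := by
          have h1 := List.length_dropWhile_le (fun y => !pvKey y) xs
          have hx : xs.length ≤ n := by simpa using Nat.le_of_succ_le_succ hn
          rw [← hd] at h1
          omega
        rw [hBd, ih d hdlen]
        -- first slice is x :: t
        have hslice : PySem.List.slice (x :: xs) (some ((-1 : Int) + 1)) (some (((x :: t).length : Int))) = x :: t := by
          rw [show ((-1 : Int) + 1) = ((0 : Nat) : Int) by norm_num]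
          rw [PySem.List.slice_natCast]
          rw [hsplit]
          simp
        rw [hslice]
        simp [pvR, hk', ← ht, ← hd]

-- ===== VERDICT (by name: the statement is the Claim_ definition above) =====
theorem group_consecutive_changes_spec : Claim_equal_group_consecutive_changes := by
  intro xs _
  unfold Spec_group_consecutive_changes
  rw [pvAlt_eq_fromBounds, pvFromBounds_eq_R xs.length xs le_rfl]
  unfold group_consecutive_changes
  by_cases h : xs = []
  · subst h; simp [pvR]
  · simp only [if_neg h]
    have := pvFoldA_eq_aux xs [] []
    simp only [List.nil_append] at this
    rw [this, pvAux_eq_R xs.length xs le_rfl]
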